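-- pv_equiv track=rewrite | github.com/romanmst1988/package-roman | src/masks.py | get_mask_card_number
-- ===== SOURCE A (Python) =====
-- def get_mask_card_number(card_number: str) -> str:
--     """Маскирует номер карты: с 7 по 12 символ отображает '*', остальные оставляет как есть."""
--     # Удаляем пробелы
--     card_number = card_number.replace(" ", "")
--     card_number_list = list(card_number)
--
--     # Маскируем с 7 по 12 символ (индекс 6 по 11)
--     for i in range(6, 12):
--         if i < len(card_number_list):
--             card_number_list[i] = "*"
--
--     # Собираем обратно, группируем по 4
--     masked = "".join(card_number_list)
--     result = " ".join(masked[i : i + 4] for i in range(0, len(masked), 4))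
--     # logger.debug("Ваш номер карты замаскирован в целях безопасности")
--     return result
-- ===== SOURCE B (Python) =====
-- def get_mask_card_number(card_number: str) -> str:
--     """Маскирует номер карты: с 7 по 12 символ отображает '*', остальные оставляет как есть."""
--     out = []
--     pos = 0
--     for ch in card_number:
--         if ch == " ":
--             continue
--         if pos != 0 and pos % 4 == 0:
--             out.append(" ")
--         out.append("*" if 6 <= pos < 12 else ch)
--         pos += 1
--     return "".join(out)
-- ===== Notes on version B (the rewrite author's own statement) =====
-- stated objective: alternative
-- what changed: A runs three staged passes (strip spaces, a range(6,12) in-place masking loop over a list copy, then a slice-and-join regrouping pass); B is one fused left-to-right pass over the original string with a position counter, skipping spaces and emitting a separator before every 4th kept character and a mask or the character itself as it goes.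
import Mathlib
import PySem

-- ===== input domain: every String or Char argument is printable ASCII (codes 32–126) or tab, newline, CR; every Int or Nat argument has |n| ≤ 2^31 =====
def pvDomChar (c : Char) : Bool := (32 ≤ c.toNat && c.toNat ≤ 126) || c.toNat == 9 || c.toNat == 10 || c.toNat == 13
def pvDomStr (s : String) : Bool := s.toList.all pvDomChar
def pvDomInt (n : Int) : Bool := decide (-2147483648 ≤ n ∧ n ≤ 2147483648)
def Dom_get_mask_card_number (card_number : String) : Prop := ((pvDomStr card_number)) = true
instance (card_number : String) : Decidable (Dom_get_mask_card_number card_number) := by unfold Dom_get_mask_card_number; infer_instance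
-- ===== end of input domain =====

-- B replaces A's three staged passes (strip spaces, range(6,12) in-place masking loop,
-- slice-and-join regrouping) by ONE fused pass over the original string with a position counter.

-- ===== PORT A =====
def get_mask_card_number (card_number : String) : String :=
  -- card_number = card_number.replace(" ", "")
  let cs := PySem.Chars.replace card_number.toList [' '] []
  -- for i in range(6, 12): if i < len(card_number_list): card_number_list[i] = '*'
  let masked := (PySem.List.pyRange 6 12 1).foldl
      (fun l i => if i < PySem.List.len l then PySem.List.pySetD l i '*' else l) cs
  -- " ".join(masked[i:i+4] for i in range(0, len(masked), 4))
  String.ofList (PySem.Chars.join [' ']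
      ((PySem.List.pyRange 0 (PySem.List.len masked) 4).map
        (fun i => PySem.List.slice masked (some i) (some (i + 4)))))

-- ===== PORT B =====
-- one fused pass: state (out, pos); skip spaces; separator before every 4th kept char; mask 6..11
def get_mask_card_number_alt (card_number : String) : String :=
  let st := card_number.toList.foldl
    (fun (st : List Char × Int) ch =>
      if ch = ' ' then st
      else
        ((if st.2 ≠ 0 ∧ PySem.Int.mod st.2 4 = 0 then st.1 ++ [' '] else st.1)
           ++ [if 6 ≤ st.2 ∧ st.2 < 12 then '*' else ch],
         st.2 + 1))
    ([], 0)
  String.ofList st.1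

-- ===== PRECONDITION & SPEC =====
def Spec_get_mask_card_number (card_number : String) (out : String) : Prop := out = get_mask_card_number_alt card_number
instance (card_number : String) (out : String) : Decidable (Spec_get_mask_card_number card_number out) := by unfold Spec_get_mask_card_number; infer_instance

-- ===== CLAIM (what is proved, stated in full; the proofs are below) =====
def Claim_equal_get_mask_card_number : Prop := ∀ (card_number : String), Dom_get_mask_card_number card_number → Spec_get_mask_card_number card_number (get_mask_card_number card_number)

-- ===== LEMMAS AND PROOFS =====

-- A's replace(" ", "") is exactly filtering the spaces out.
theorem pv_replace_go (fuel : Nat) : ∀ (l acc : List Char), l.length ≤ fuel →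
    PySem.Chars.replace.go [' '] [] fuel l acc
      = acc.reverse ++ l.filter (fun c => !(c == ' ')) := by
  induction fuel with
  | zero =>
    intro l acc h
    rw [List.length_eq_zero_iff.mp (Nat.le_zero.mp h)]
    simp [PySem.Chars.replace.go]
  | succ n ih =>
    intro l acc h
    cases l with
    | nil => simp [PySem.Chars.replace.go]
    | cons c t =>
      simp only [PySem.Chars.replace.go]
      by_cases hc : c = ' '
      · subst hc
        rw [if_pos (by simp [List.isPrefixOf])]
        simp only [List.length_cons] at h
        simpa using ih t acc (by omega)
      · rw [if_neg (by simp [List.isPrefixOf]; exact fun hh => hc hh.symm)]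
        simp only [List.length_cons] at h
        rw [ih t (c :: acc) (by omega)]
        simp [hc]

theorem pv_replace_eq (cs : List Char) :
    PySem.Chars.replace cs [' '] [] = cs.filter (fun c => !(c == ' ')) := by
  rw [PySem.Chars.replace, if_neg (by simp), pv_replace_go cs.length cs [] le_rfl]
  simp

-- A's guarded write `if i < len: l[i] = '*'` is List.set at i (set past the end is a no-op).
theorem pv_step (l : List Char) (i : Int) (h : 0 ≤ i) :
    (if i < PySem.List.len l then PySem.List.pySetD l i '*' else l) = l.set i.toNat '*' := by
  split_ifs with hlt
  · exact PySem.List.pySetD_of_nonneg _ _ h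
  · rw [List.set_eq_of_length_le]
    simp [PySem.List.len_eq] at hlt
    omega

-- positional masking map: '*' at absolute positions 6..11
def pvMark (l : List Char) (pos : Nat) : List Char :=
  match l with
  | [] => []
  | c :: t => (if 6 ≤ pos ∧ pos < 12 then '*' else c) :: pvMark t (pos + 1)

theorem pvMark_getElem? (l : List Char) (p j : Nat) :
    (pvMark l p)[j]? = (l[j]?).map (fun c => if 6 ≤ p + j ∧ p + j < 12 then '*' else c) := by
  induction l generalizing p j with
  | nil => simp [pvMark]
  | cons c t ih =>
    cases j with
    | zero => simp [pvMark]
    | succ m =>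
      simp only [pvMark, List.getElem?_cons_succ]
      rw [ih (p + 1) m, show p + 1 + m = p + (m + 1) by omega]

-- A's masking loop over range(6, 12) equals the positional masking map from position 0.
theorem pv_mask_eq (cs : List Char) :
    (PySem.List.pyRange 6 12 1).foldl
      (fun l i => if i < PySem.List.len l then PySem.List.pySetD l i '*' else l) cs
    = pvMark cs 0 := by
  rw [show PySem.List.pyRange 6 12 1 = [6,7,8,9,10,11] from by decide]
  simp only [List.foldl_cons, List.foldl_nil,
    pv_step _ 6 (by norm_num), pv_step _ 7 (by norm_num), pv_step _ 8 (by norm_num),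
    pv_step _ 9 (by norm_num), pv_step _ 10 (by norm_num), pv_step _ 11 (by norm_num)]
  apply List.ext_getElem?
  intro j
  rw [pvMark_getElem?]
  simp only [List.getElem?_set, List.length_set, Nat.zero_add,
    show Int.toNat 6 = 6 from rfl, show Int.toNat 7 = 7 from rfl,
    show Int.toNat 8 = 8 from rfl, show Int.toNat 9 = 9 from rfl,
    show Int.toNat 10 = 10 from rfl, show Int.toNat 11 = 11 from rfl]
  by_cases h : j < cs.length
  · rw [List.getElem?_eq_getElem h]
    simp only [Option.map_some]
    split_ifs <;> first | rfl | omega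
  · rw [List.getElem?_eq_none (by omega)]
    simp only [Option.map_none]
    split_ifs <;> first | rfl | omega

-- separated tail chunks (A-side shape of the regrouping, after the first chunk)
def pvTail (t : List Char) : List Char :=
  if h : t = [] then []
  else [' '] ++ t.take 4 ++ pvTail (t.drop 4)
termination_by t.length
decreasing_by
  simp only [List.length_drop]
  have := List.length_pos_iff.mpr h
  omega

-- proof-side shape of A's grouping: recursion peeling 4 characters at a time
def pvGroup (l : List Char) : List Char :=
  if l.length ≤ 4 then l
  else l.take 4 ++ [' '] ++ pvGroup (l.drop 4)
termination_by l.length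
decreasing_by simp; omega

theorem pv_join_cons {sep p : List Char} {rest : List (List Char)} (h : rest ≠ []) :
    PySem.Chars.join sep (p :: rest) = p ++ sep ++ PySem.Chars.join sep rest := by
  cases rest with
  | nil => exact absurd rfl h
  | cons q r => exact PySem.Chars.join_cons_cons sep p q r

-- A's slice comprehension over range(0, len, 4) as a map over chunk numbers
theorem pv_slices (l : List Char) :
    (PySem.List.pyRange 0 (PySem.List.len l) 4).map
      (fun i => PySem.List.slice l (some i) (some (i + 4)))
    = (List.range ((l.length + 3) / 4)).map (fun k => (l.drop (4*k)).take 4) := by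
  rw [PySem.List.len_eq, PySem.List.pyRange_of_pos _ _ (by norm_num), List.map_map]
  have hc : (if (0:Int) < (l.length:Int) then (((l.length:Int) - 0 + 4 - 1) / 4).toNat else 0)
      = (l.length + 3) / 4 := by split_ifs with h <;> omega
  rw [hc]
  apply List.map_congr_left
  intro k hk
  simp only [Function.comp]
  rw [show (0 + 4*(k:Int)) = ((4*k : Nat) : Int) by push_cast; ring,
      show ((4*k : Nat) : Int) + 4 = ((4*k + 4 : Nat) : Int) by push_cast; ring,
      PySem.List.slice_natCast]
  congr 1
  omega

-- joining the 4-chunks with ' ' is exactly the peel-4 recursion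
theorem pv_group_chunks (l : List Char) :
    PySem.Chars.join [' '] ((List.range ((l.length + 3) / 4)).map (fun k => (l.drop (4*k)).take 4))
    = pvGroup l := by
  fun_induction pvGroup l with
  | case1 l h =>
    by_cases h0 : l = []
    · subst h0; simp [PySem.Chars.join_nil]
    · have hn : 0 < l.length := List.length_pos_iff.mpr h0
      rw [show (l.length + 3) / 4 = 1 by omega]
      simp [PySem.Chars.join_singleton, List.take_of_length_le h]
  | case2 l h ih =>
    have hm : (l.length + 3) / 4 = ((l.drop 4).length + 3) / 4 + 1 := by
      simp only [List.length_drop]; omega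
    rw [hm, List.range_succ_eq_map, List.map_cons, List.map_map]
    have hne : (List.range (((l.drop 4).length + 3) / 4)).map
        ((fun k => (l.drop (4*k)).take 4) ∘ (· + 1)) ≠ [] := by
      simp only [ne_eq, List.map_eq_nil_iff, List.range_eq_nil, List.length_drop]
      omega
    rw [pv_join_cons hne]
    simp only [Nat.mul_zero, List.drop_zero]
    congr 1
    rw [← ih]
    congr 1
    apply List.map_congr_left
    intro k hk
    simp only [Function.comp]
    rw [List.drop_drop]
    congr 2
    omega

-- the peel-4 recursion splits as first chunk ++ separated tail chunks
theorem pv_group_eq_tail (l : List Char) : pvGroup l = l.take 4 ++ pvTail (l.drop 4) := by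
  fun_induction pvGroup l with
  | case1 l h =>
    rw [pvTail, dif_pos (by rw [List.drop_eq_nil_iff]; omega), List.append_nil,
      List.take_of_length_le h]
  | case2 l h ih =>
    have hne : ¬ (l.drop 4 = []) := by rw [List.drop_eq_nil_iff]; omega
    conv_rhs => rw [pvTail, dif_neg hne]
    rw [ih, List.drop_drop]
    simp

-- B-side: what the fused pass emits for the (already space-free) tail, from absolute position pos
def pvEmit (l : List Char) (pos : Nat) : List Char :=
  match l with
  | [] => []
  | c :: t =>
      (if pos ≠ 0 ∧ pos % 4 = 0 then [' '] else [])
        ++ (if 6 ≤ pos ∧ pos < 12 then '*' else c) :: pvEmit t (pos + 1)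

-- separator-insertion alone, on an already-masked list
def pvSep (l : List Char) (pos : Nat) : List Char :=
  match l with
  | [] => []
  | c :: t => (if pos ≠ 0 ∧ pos % 4 = 0 then [' '] else []) ++ c :: pvSep t (pos + 1)

theorem pvEmit_eq_sep_mark (l : List Char) (pos : Nat) :
    pvEmit l pos = pvSep (pvMark l pos) pos := by
  induction l generalizing pos with
  | nil => rfl
  | cons c t ih => simp [pvEmit, pvMark, pvSep, ih]

-- B's fold step, on a nonnegative (Nat-cast) position, in Nat form
theorem pv_stepB (out : List Char) (pos : Nat) (c : Char) :
    ((if ((pos : Int) ≠ 0 ∧ PySem.Int.mod (pos : Int) 4 = 0) then out ++ [' '] else out)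
       ++ [if 6 ≤ (pos : Int) ∧ (pos : Int) < 12 then '*' else c],
      ((pos : Int) + 1))
    = (out ++ (if pos ≠ 0 ∧ pos % 4 = 0 then [' '] else [])
         ++ [if 6 ≤ pos ∧ pos < 12 then '*' else c],
       ((pos + 1 : Nat) : Int)) := by
  have hmod : PySem.Int.mod (pos : Int) 4 = ((pos % 4 : Nat) : Int) := by
    rw [PySem.Int.mod_eq_emod_of_pos (by norm_num)]
    omega
  have hsep : (((pos : Int) ≠ 0 ∧ ((pos % 4 : Nat) : Int) = 0)) ↔ (pos ≠ 0 ∧ pos % 4 = 0) := by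
    omega
  have hmask : ((6 ≤ (pos : Int) ∧ (pos : Int) < 12)) ↔ (6 ≤ pos ∧ pos < 12) := by
    omega
  simp only [Prod.mk.injEq, hmod, hsep, hmask]
  refine ⟨?_, by push_cast; ring⟩
  split_ifs <;> simp

-- B's fold over a space-free list, from state (out, pos), appends exactly pvEmit
theorem pv_fold_emit (l : List Char) : ∀ (out : List Char) (pos : Nat),
    (l.foldl
      (fun (st : List Char × Int) ch =>
        if ch = ' ' then st
        else
          ((if st.2 ≠ 0 ∧ PySem.Int.mod st.2 4 = 0 then st.1 ++ [' '] else st.1)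
             ++ [if 6 ≤ st.2 ∧ st.2 < 12 then '*' else ch],
           st.2 + 1))
      (out, (pos : Int))).1
    = out ++ pvEmit (l.filter (fun c => !(c == ' '))) pos := by
  induction l with
  | nil => intro out pos; simp [pvEmit]
  | cons c t ih =>
    intro out pos
    by_cases hc : c = ' '
    · subst hc; simpa using ih out pos
    · simp only [List.foldl_cons, if_neg hc, List.filter_cons,
        show (!(c == ' ')) = true by simp [hc]]
      rw [pv_stepB out pos c, ih _ (pos + 1)]
      simp [pvEmit, List.append_assoc]

-- separator insertion from a position > 0 lands inside/at the end of a chunk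
theorem pv_sep_pos (l : List Char) : ∀ (pos : Nat), pos ≠ 0 →
    pvSep l pos = l.take ((4 - pos % 4) % 4) ++ pvTail (l.drop ((4 - pos % 4) % 4)) := by
  induction l with
  | nil => intro pos _; simp [pvSep, pvTail]
  | cons c t ih =>
    intro pos hpos
    rcases (by omega : pos % 4 = 0 ∨ pos % 4 = 1 ∨ pos % 4 = 2 ∨ pos % 4 = 3) with
      hr | hr | hr | hr
    · -- pos % 4 = 0: separator fires, then a fresh chunk of 4
      simp only [pvSep]
      rw [if_pos ⟨hpos, hr⟩, ih (pos + 1) (by omega)]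
      rw [show (4 - (pos + 1) % 4) % 4 = 3 by omega, show (4 - pos % 4) % 4 = 0 by omega]
      rw [List.take_zero, List.drop_zero, List.nil_append]
      conv_rhs => rw [pvTail]
      rw [dif_neg (show ¬(c :: t = []) by simp)]
      simp [List.take_succ_cons]
    · -- pos % 4 = 1
      simp only [pvSep]
      rw [if_neg (by omega), ih (pos + 1) (by omega)]
      rw [show (4 - (pos + 1) % 4) % 4 = 2 by omega, show (4 - pos % 4) % 4 = 3 by omega]
      simp [List.take_succ_cons]
    · -- pos % 4 = 2
      simp only [pvSep]
      rw [if_neg (by omega), ih (pos + 1) (by omega)]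
      rw [show (4 - (pos + 1) % 4) % 4 = 1 by omega, show (4 - pos % 4) % 4 = 2 by omega]
      simp [List.take_succ_cons]
    · -- pos % 4 = 3: last slot of a chunk
      simp only [pvSep]
      rw [if_neg (by omega), ih (pos + 1) (by omega)]
      rw [show (4 - (pos + 1) % 4) % 4 = 0 by omega, show (4 - pos % 4) % 4 = 1 by omega]
      simp [List.take_succ_cons]

theorem pv_sep_zero (l : List Char) : pvSep l 0 = l.take 4 ++ pvTail (l.drop 4) := by
  cases l with
  | nil => simp [pvSep, pvTail]
  | cons c t =>
    simp only [pvSep]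
    rw [if_neg (by simp), pv_sep_pos t 1 (by omega)]
    norm_num [List.take_succ_cons]

-- ===== VERDICT (by name: the statement is the Claim_ definition above) =====
theorem get_mask_card_number_spec : Claim_equal_get_mask_card_number := by
  intro card_number _
  simp only [Spec_get_mask_card_number, get_mask_card_number, get_mask_card_number_alt]
  rw [show (([], (0:Int)) : List Char × Int) = (([], ((0 : Nat) : Int)) : List Char × Int) by
        norm_num]
  rw [pv_fold_emit card_number.toList [] 0, pv_replace_eq, pv_mask_eq,
    pv_slices, pv_group_chunks, pv_group_eq_tail, pvEmit_eq_sep_mark, pv_sep_zero]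
  simp
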